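-- pv_equiv track=rewrite | github.com/Ladygina/files_ | task1.py | dict_write
-- ===== SOURCE A (Python) =====
-- def dict_write(names, count, ingredients, quantity, measure):
--   cook_book = {}
--   for i in range(len(names)):
--     str_curr_list =[]
--     for j in range(count[i]):
--       str_curr ={}
--       str_curr['ingredients']=ingredients[j]
--       str_curr['quantity'] = quantity[j]
--       str_curr['measure'] = measure[j]
--       str_curr_list.append(str_curr)
--     cook_book[names[i]]= str_curr_list
--
--   return cook_book
-- ===== SOURCE B (Python) =====
-- def dict_write(names, count, ingredients, quantity, measure):
--     rows = [{'ingredients': a, 'quantity': q, 'measure': m}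
--             for a, q, m in zip(ingredients, quantity, measure)]
--     return {name: [rows[j] for j in range(c)] for name, c in zip(names, count)}
-- ===== Notes on version B (the rewrite author's own statement) =====
-- stated objective: alternative
-- what changed: B builds the table of per-index ingredient dicts once by zipping the three parallel lists, then maps each name to the entries indexed by its count, instead of rebuilding every dict key-by-key inside a nested loop.
import Mathlib
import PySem

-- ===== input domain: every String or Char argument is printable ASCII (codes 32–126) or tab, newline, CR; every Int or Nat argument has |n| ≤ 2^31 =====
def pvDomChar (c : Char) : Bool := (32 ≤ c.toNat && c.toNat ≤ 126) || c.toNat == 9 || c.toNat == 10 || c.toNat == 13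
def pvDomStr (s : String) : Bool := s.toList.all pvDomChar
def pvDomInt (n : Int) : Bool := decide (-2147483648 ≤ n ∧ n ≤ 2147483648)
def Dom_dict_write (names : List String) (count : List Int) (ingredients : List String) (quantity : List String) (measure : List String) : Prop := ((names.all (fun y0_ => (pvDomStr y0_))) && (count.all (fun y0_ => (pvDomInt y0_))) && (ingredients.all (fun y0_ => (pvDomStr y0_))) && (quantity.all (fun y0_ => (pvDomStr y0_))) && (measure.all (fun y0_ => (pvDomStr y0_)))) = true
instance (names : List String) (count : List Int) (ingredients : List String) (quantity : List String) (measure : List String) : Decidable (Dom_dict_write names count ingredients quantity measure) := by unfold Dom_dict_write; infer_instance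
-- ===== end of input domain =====

-- ===== PORT A =====
-- Header: B builds the per-index entry dicts once by zipping the three parallel lists and
-- indexes that shared table per name; A rebuilds every entry dict in a nested loop (alternative).
-- A-side helper: the dict {'ingredients': ..., 'quantity': ..., 'measure': ...} built by three key assignments
def pvEntryA (ingredients : List String) (quantity : List String) (measure : List String) (j : Int) : List (String × String) :=
  ((((PySem.Dict.empty : PySem.Dict String String).insert "ingredients" (PySem.List.pyGetD ingredients j "")).insert
      "quantity" (PySem.List.pyGetD quantity j "")).insert
      "measure" (PySem.List.pyGetD measure j "")).items

def dict_write (names : List String) (count : List Int) (ingredients : List String) (quantity : List String) (measure : List String) : List (String × List (List (String × String))) :=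
  ((PySem.List.pyRange 0 (names.length : Int) 1).foldl
    (fun cook_book i =>
      let str_curr_list := (PySem.List.pyRange 0 (PySem.List.pyGetD count i 0) 1).foldl
        (fun acc j => acc ++ [pvEntryA ingredients quantity measure j]) []
      cook_book.insert (PySem.List.pyGetD names i "") str_curr_list)
    (PySem.Dict.empty : PySem.Dict String (List (List (String × String))))).items

-- ===== PORT B =====
-- B-side helper: the dict literal {'ingredients': a, 'quantity': q, 'measure': m}
def pvRowB (t : String × String × String) : List (String × String) :=
  [("ingredients", t.1), ("quantity", t.2.1), ("measure", t.2.2)]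

def dict_write_alt (names : List String) (count : List Int) (ingredients : List String) (quantity : List String) (measure : List String) : List (String × List (List (String × String))) :=
  let rows := (ingredients.zip (quantity.zip measure)).map pvRowB
  ((names.zip count).foldl
    (fun cook_book p =>
      cook_book.insert p.1
        ((PySem.List.pyRange 0 p.2 1).map (fun j => PySem.List.pyGetD rows j [])))
    (PySem.Dict.empty : PySem.Dict String (List (List (String × String))))).items

-- ===== PRECONDITION & SPEC =====
-- Pre_: exactly the inputs where A returns normally (no IndexError): count has an entry for
-- every name, and each used count fits within all three ingredient-data lists.
def Pre_dict_write (names : List String) (count : List Int) (ingredients : List String) (quantity : List String) (measure : List String) : Prop :=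
  names.length ≤ count.length ∧
  ∀ c ∈ count.take names.length,
    c ≤ (ingredients.length : Int) ∧ c ≤ (quantity.length : Int) ∧ c ≤ (measure.length : Int)
instance (names : List String) (count : List Int) (ingredients : List String) (quantity : List String) (measure : List String) : Decidable (Pre_dict_write names count ingredients quantity measure) := by unfold Pre_dict_write; infer_instance

def pvWitness_dict_write : List String × List Int × List String × List String × List String :=
  (["soup"], [1], ["water"], ["1"], ["l"])

def Spec_dict_write (names : List String) (count : List Int) (ingredients : List String) (quantity : List String) (measure : List String) (out : List (String × List (List (String × String)))) : Prop := out = dict_write_alt names count ingredients quantity measure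
instance (names : List String) (count : List Int) (ingredients : List String) (quantity : List String) (measure : List String) (out : List (String × List (List (String × String)))) : Decidable (Spec_dict_write names count ingredients quantity measure out) := by unfold Spec_dict_write; infer_instance

-- ===== CLAIM (what is proved, stated in full; the proofs are below) =====
def Claim_equal_dict_write : Prop := ∀ (names : List String) (count : List Int) (ingredients : List String) (quantity : List String) (measure : List String), Dom_dict_write names count ingredients quantity measure → Pre_dict_write names count ingredients quantity measure → Spec_dict_write names count ingredients quantity measure (dict_write names count ingredients quantity measure)

-- ===== LEMMAS AND PROOFS =====

-- The list of index pairs A walks equals B's zip of names with the count prefix.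
theorem pv_zip_eq (ns : List String) (cs : List Int) (h : ns.length ≤ cs.length) :
    (PySem.List.pyRange 0 (ns.length : Int) 1).map
        (fun i => (PySem.List.pyGetD ns i "", PySem.List.pyGetD cs i 0))
      = ns.zip (cs.take ns.length) := by
  apply List.ext_getElem
  · simp [PySem.List.length_pyRange_one]
    omega
  · intro k h1 h2
    have hk : k < ns.length := by
      simpa [PySem.List.length_pyRange_one] using h1
    have hk' : k < cs.length := by omega
    simp [PySem.List.getElem_pyRange_one, PySem.List.pyGetD_natCast,
      List.getD_eq_getElem?_getD, hk, hk']

-- zip truncates: zipping with the full count list equals zipping with its prefix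
theorem pv_zip_take (ns : List String) (cs : List Int) :
    ns.zip cs = ns.zip (cs.take ns.length) := by
  induction ns generalizing cs with
  | nil => simp
  | cons a t ih =>
    cases cs with
    | nil => simp
    | cons c ct => simp [List.zip_cons_cons, ih ct]

-- A's per-index dict equals B's shared-table lookup when the index is within the counted range.
theorem pv_entry_eq (ingredients quantity measure : List String) (c : Int)
    (h1 : c ≤ (ingredients.length : Int)) (h2 : c ≤ (quantity.length : Int))
    (h3 : c ≤ (measure.length : Int)) (j : Int) (hj : j ∈ PySem.List.pyRange 0 c 1) :
    pvEntryA ingredients quantity measure j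
      = PySem.List.pyGetD ((ingredients.zip (quantity.zip measure)).map pvRowB) j [] := by
  rw [PySem.List.mem_pyRange_one] at hj
  obtain ⟨hj0, hjc⟩ := hj
  have hi : j.toNat < ingredients.length := by omega
  have hq : j.toNat < quantity.length := by omega
  have hm : j.toNat < measure.length := by omega
  have hi' : j < (ingredients.length : Int) := by omega
  have hq' : j < (quantity.length : Int) := by omega
  have hm' : j < (measure.length : Int) := by omega
  have hz' : j < (((ingredients.zip (quantity.zip measure)).map pvRowB).length : Int) := by
    simp [List.length_zip]; omega
  rw [show pvEntryA ingredients quantity measure j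
        = [("ingredients", PySem.List.pyGetD ingredients j ""),
           ("quantity", PySem.List.pyGetD quantity j ""),
           ("measure", PySem.List.pyGetD measure j "")] from rfl,
      PySem.List.pyGetD_eq_getElem ingredients "" hj0 hi',
      PySem.List.pyGetD_eq_getElem quantity "" hj0 hq',
      PySem.List.pyGetD_eq_getElem measure "" hj0 hm',
      PySem.List.pyGetD_eq_getElem _ [] hj0 hz']
  simp [List.getElem_zip, pvRowB]

-- ===== VERDICT (by name: the statement is the Claim_ definition above) =====
theorem dict_write_spec : Claim_equal_dict_write := by
  intro names count ingredients quantity measure hdom hpre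
  unfold Spec_dict_write dict_write dict_write_alt
  simp only [PySem.List.foldl_append_singleton_eq_map, List.nil_append]
  obtain ⟨hlen, hcnt⟩ := hpre
  congr 1
  have hmap := List.foldl_map
    (f := fun i : Int => (PySem.List.pyGetD names i "", PySem.List.pyGetD count i 0))
    (g := fun (cb : PySem.Dict String (List (List (String × String)))) p =>
      cb.insert p.1 ((PySem.List.pyRange 0 p.2 1).map
        (fun j => pvEntryA ingredients quantity measure j)))
    (l := PySem.List.pyRange 0 (names.length : Int) 1)
    (init := (PySem.Dict.empty : PySem.Dict String (List (List (String × String)))))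
  rw [← hmap, pv_zip_eq names count hlen, pv_zip_take names count]
  apply PySem.List.foldl_congr_mem
  intro acc p hp
  have hc : p.2 ∈ count.take names.length := (List.of_mem_zip hp).2
  obtain ⟨h1, h2, h3⟩ := hcnt p.2 hc
  congr 1
  exact List.map_congr_left (fun j hj => pv_entry_eq ingredients quantity measure p.2 h1 h2 h3 j hj)
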